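-- pv_equiv track=rewrite | github.com/gambiTarun/Leetcode-Solutions | 2425-bitwise-xor-of-all-pairings/2425-bitwise-xor-of-all-pairings.py | xorAllNums
-- ===== SOURCE A (Python) =====
-- from typing import List
--
-- def xorAllNums(nums1: List[int], nums2: List[int]) -> int:
--
--     res = 0
--     n1 = len(nums1)
--     n2 = len(nums2)
--     for i in nums1:
--         res ^= i
--         if n2%2==0: res ^=i
--
--     for i in nums2:
--         res ^= i
--         if n1%2==0: res ^=i
--
--
--     return res
-- ===== SOURCE B (Python) =====
-- from typing import List
--
-- def xorAllNums(nums1: List[int], nums2: List[int]) -> int: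
--     # Direct computation from the definition: XOR of a ^ b over every pairing.
--     res = 0
--     for a in nums1:
--         for b in nums2:
--             res ^= a ^ b
--     return res
-- ===== Notes on version B (the rewrite author's own statement) =====
-- stated objective: alternative
-- what changed: B computes the defining quantity directly with a nested loop XOR-ing a^b over every (a,b) pairing, instead of A's linear-time per-element parity-conditional doubling; B trades A's O(n1+n2) trick for the O(n1*n2) definition.
import Mathlib
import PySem

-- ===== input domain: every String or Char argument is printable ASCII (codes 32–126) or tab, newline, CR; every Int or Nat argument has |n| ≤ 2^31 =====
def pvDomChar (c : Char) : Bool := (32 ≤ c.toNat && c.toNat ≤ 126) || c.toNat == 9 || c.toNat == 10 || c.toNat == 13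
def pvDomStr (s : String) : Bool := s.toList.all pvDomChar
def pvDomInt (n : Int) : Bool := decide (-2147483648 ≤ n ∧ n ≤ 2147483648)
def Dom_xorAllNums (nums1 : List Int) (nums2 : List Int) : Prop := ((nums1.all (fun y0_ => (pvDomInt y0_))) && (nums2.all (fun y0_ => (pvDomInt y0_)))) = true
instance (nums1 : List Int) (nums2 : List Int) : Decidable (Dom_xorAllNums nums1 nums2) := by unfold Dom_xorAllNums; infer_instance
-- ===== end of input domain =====

-- B computes the defining quantity directly: a nested loop XOR-ing a^b over every pairing
-- (O(n1*n2)), instead of A's per-element parity-conditional doubling (objective: alternative).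

-- ===== PORT A =====
def xorAllNums (nums1 : List Int) (nums2 : List Int) : Int :=
  let res : Int := 0
  let n1 : Int := nums1.length
  let n2 : Int := nums2.length
  let res := nums1.foldl (fun res i =>
    let res := PySem.Int.bxor res i
    if n2 % 2 == 0 then PySem.Int.bxor res i else res) res
  let res := nums2.foldl (fun res i =>
    let res := PySem.Int.bxor res i
    if n1 % 2 == 0 then PySem.Int.bxor res i else res) res
  res

-- ===== PORT B =====
def xorAllNums_alt (nums1 : List Int) (nums2 : List Int) : Int :=
  nums1.foldl (fun res a =>
    nums2.foldl (fun res b => PySem.Int.bxor res (PySem.Int.bxor a b)) res) 0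

-- ===== PRECONDITION & SPEC =====
def Spec_xorAllNums (nums1 : List Int) (nums2 : List Int) (out : Int) : Prop := out = xorAllNums_alt nums1 nums2
instance (nums1 : List Int) (nums2 : List Int) (out : Int) : Decidable (Spec_xorAllNums nums1 nums2 out) := by unfold Spec_xorAllNums; infer_instance

-- ===== CLAIM (what is proved, stated in full; the proofs are below) =====
def Claim_equal_xorAllNums : Prop := ∀ (nums1 : List Int) (nums2 : List Int), Dom_xorAllNums nums1 nums2 → Spec_xorAllNums nums1 nums2 (xorAllNums nums1 nums2)

-- ===== LEMMAS AND PROOFS =====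

-- Canonical decomposition of an Int into (sign bit, magnitude bits), to reason about bxor.
def pvN (a : Int) : Bool := decide (a < 0)
def pvU (a : Int) : Nat := if a < 0 then (-a - 1).toNat else a.toNat
def pvMk (b : Bool) (n : Nat) : Int := if b then -(n : Int) - 1 else (n : Int)

theorem bxor_mk (a b : Int) : PySem.Int.bxor a b = pvMk (pvN a != pvN b) (pvU a ^^^ pvU b) := by
  simp only [PySem.Int.bxor, pvMk, pvN, pvU]
  split_ifs with h1 h2 h2 <;> simp_all <;> omega

theorem pvN_mk (b : Bool) (n : Nat) : pvN (pvMk b n) = b := by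
  cases b <;> simp [pvN, pvMk] <;> omega

theorem pvU_mk (b : Bool) (n : Nat) : pvU (pvMk b n) = n := by
  cases b <;> simp [pvU, pvMk] <;> omega

theorem bxor_assoc (a b c : Int) :
    PySem.Int.bxor (PySem.Int.bxor a b) c = PySem.Int.bxor a (PySem.Int.bxor b c) := by
  rw [bxor_mk a b, bxor_mk b c, bxor_mk _ c, bxor_mk a _, pvN_mk, pvU_mk, pvN_mk, pvU_mk,
    Nat.xor_assoc]
  cases pvN a <;> cases pvN b <;> cases pvN c <;> rfl

theorem zero_bxor (a : Int) : PySem.Int.bxor 0 a = a := by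
  rw [PySem.Int.bxor_comm, PySem.Int.bxor_zero]

theorem bxor_left_comm (a b c : Int) :
    PySem.Int.bxor a (PySem.Int.bxor b c) = PySem.Int.bxor b (PySem.Int.bxor a c) := by
  rw [← bxor_assoc, PySem.Int.bxor_comm a b, bxor_assoc]

theorem bxor_self_left (a c : Int) :
    PySem.Int.bxor a (PySem.Int.bxor a c) = c := by
  rw [← bxor_assoc, PySem.Int.bxor_self, zero_bxor]

theorem bxor_cancel (r i : Int) : PySem.Int.bxor (PySem.Int.bxor r i) i = r := by
  rw [bxor_assoc, PySem.Int.bxor_self, PySem.Int.bxor_zero]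

-- XOR of a whole list.
def pvX (xs : List Int) : Int := xs.foldl (fun a b => PySem.Int.bxor a b) 0

theorem foldl_bxor_shift (xs : List Int) (r s : Int) :
    xs.foldl (fun a b => PySem.Int.bxor a b) (PySem.Int.bxor r s) =
      PySem.Int.bxor r (xs.foldl (fun a b => PySem.Int.bxor a b) s) := by
  induction xs generalizing s with
  | nil => rfl
  | cons x xs ih => simp only [List.foldl_cons, bxor_assoc, ih]

theorem pvX_cons (x : Int) (xs : List Int) : pvX (x :: xs) = PySem.Int.bxor x (pvX xs) := by
  have h := foldl_bxor_shift xs x 0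
  simp only [pvX, List.foldl_cons, zero_bxor]
  rwa [PySem.Int.bxor_zero] at h

-- A's loop with the conditional doubling taken (even parity) is the identity.
theorem foldl_double_id (xs : List Int) (r : Int) :
    xs.foldl (fun res i => PySem.Int.bxor (PySem.Int.bxor res i) i) r = r := by
  induction xs generalizing r with
  | nil => rfl
  | cons x xs ih => simp [List.foldl_cons, bxor_cancel, ih]

theorem foldl_bxor_zero (xs : List Int) (r : Int) :
    xs.foldl (fun a b => PySem.Int.bxor a b) r = PySem.Int.bxor r (pvX xs) := by
  have := foldl_bxor_shift xs r 0
  rwa [PySem.Int.bxor_zero] at this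

-- What A computes, in closed form over the two list XORs.
theorem A_closed (nums1 nums2 : List Int) :
    xorAllNums nums1 nums2 =
      PySem.Int.bxor (if nums2.length % 2 = 1 then pvX nums1 else 0)
                     (if nums1.length % 2 = 1 then pvX nums2 else 0) := by
  unfold xorAllNums
  by_cases h2 : nums2.length % 2 = 1 <;> by_cases h1 : nums1.length % 2 = 1
  · have e2 : (((nums2.length : Int) % 2 == 0) = false) := by simp; omega
    have e1 : (((nums1.length : Int) % 2 == 0) = false) := by simp; omega
    simp only [e1, e2, Bool.false_eq_true, if_false, if_pos h1, if_pos h2]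
    rw [foldl_bxor_zero nums2, show nums1.foldl _ 0 = pvX nums1 from rfl]
  · have e2 : (((nums2.length : Int) % 2 == 0) = false) := by simp; omega
    have e1 : (((nums1.length : Int) % 2 == 0) = true) := by simp; omega
    simp only [e1, e2, Bool.false_eq_true, if_false, if_true, if_pos h2, if_neg h1]
    rw [show nums1.foldl _ 0 = pvX nums1 from rfl, foldl_double_id, PySem.Int.bxor_zero]
  · have e2 : (((nums2.length : Int) % 2 == 0) = true) := by simp; omega
    have e1 : (((nums1.length : Int) % 2 == 0) = false) := by simp; omega
    simp only [e1, e2, Bool.false_eq_true, if_false, if_true, if_neg h2, if_pos h1]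
    rw [foldl_double_id, foldl_bxor_zero nums2, zero_bxor]
  · have e2 : (((nums2.length : Int) % 2 == 0) = true) := by simp; omega
    have e1 : (((nums1.length : Int) % 2 == 0) = true) := by simp; omega
    simp only [e1, e2, if_true, if_neg h1, if_neg h2]
    rw [foldl_double_id, foldl_double_id, PySem.Int.bxor_zero]

-- B's inner row: XOR over b of (a ^ b), from seed r.
theorem row_closed (a : Int) (xs : List Int) (r : Int) :
    xs.foldl (fun res b => PySem.Int.bxor res (PySem.Int.bxor a b)) r =
      PySem.Int.bxor r (PySem.Int.bxor (if xs.length % 2 = 1 then a else 0) (pvX xs)) := by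
  induction xs generalizing r with
  | nil => simp [pvX, PySem.Int.bxor_zero]
  | cons x xs ih =>
    simp only [List.foldl_cons, ih, pvX_cons, List.length_cons]
    by_cases h : xs.length % 2 = 1
    · have h' : ¬ ((xs.length + 1) % 2 = 1) := by omega
      simp only [if_pos h, if_neg h']
      simp only [bxor_assoc, PySem.Int.bxor_comm, bxor_left_comm, bxor_self_left, PySem.Int.bxor_self, PySem.Int.bxor_zero, zero_bxor]
    · have h' : (xs.length + 1) % 2 = 1 := by omega
      simp only [if_neg h, if_pos h']
      simp only [bxor_assoc, PySem.Int.bxor_comm, bxor_left_comm, bxor_self_left, PySem.Int.bxor_self, PySem.Int.bxor_zero, zero_bxor]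

-- B's outer loop in the odd-|nums2| case.
theorem outer_odd (C : Int) (xs : List Int) (r : Int) :
    xs.foldl (fun res a => PySem.Int.bxor res (PySem.Int.bxor a C)) r =
      PySem.Int.bxor r (PySem.Int.bxor (pvX xs) (if xs.length % 2 = 1 then C else 0)) := by
  induction xs generalizing r with
  | nil => simp [pvX, PySem.Int.bxor_zero]
  | cons x xs ih =>
    simp only [List.foldl_cons, ih, pvX_cons, List.length_cons]
    by_cases h : xs.length % 2 = 1
    · have h' : ¬ ((xs.length + 1) % 2 = 1) := by omega
      simp only [if_pos h, if_neg h']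
      simp only [bxor_assoc, PySem.Int.bxor_comm, bxor_left_comm, bxor_self_left, PySem.Int.bxor_self, PySem.Int.bxor_zero, zero_bxor]
    · have h' : (xs.length + 1) % 2 = 1 := by omega
      simp only [if_neg h, if_pos h']
      simp only [bxor_assoc, PySem.Int.bxor_comm, bxor_left_comm, bxor_self_left, PySem.Int.bxor_self, PySem.Int.bxor_zero, zero_bxor]

-- B's outer loop in the even-|nums2| case: each row contributes the constant pvX nums2.
theorem outer_even (C : Int) (xs : List Int) (r : Int) :
    xs.foldl (fun res _ => PySem.Int.bxor res C) r =
      PySem.Int.bxor r (if xs.length % 2 = 1 then C else 0) := by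
  induction xs generalizing r with
  | nil => simp [PySem.Int.bxor_zero]
  | cons x xs ih =>
    simp only [List.foldl_cons, ih, List.length_cons]
    by_cases h : xs.length % 2 = 1
    · have h' : ¬ ((xs.length + 1) % 2 = 1) := by omega
      simp only [if_pos h, if_neg h']
      rw [bxor_assoc, PySem.Int.bxor_self, PySem.Int.bxor_zero]
    · have h' : (xs.length + 1) % 2 = 1 := by omega
      simp only [if_neg h, if_pos h']
      rw [PySem.Int.bxor_zero]

-- What B computes, in the same closed form.
theorem B_closed (nums1 nums2 : List Int) :
    xorAllNums_alt nums1 nums2 =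
      PySem.Int.bxor (if nums2.length % 2 = 1 then pvX nums1 else 0)
                     (if nums1.length % 2 = 1 then pvX nums2 else 0) := by
  unfold xorAllNums_alt
  simp only [row_closed]
  by_cases h2 : nums2.length % 2 = 1
  · simp only [if_pos h2]
    rw [outer_odd (pvX nums2) nums1 0, zero_bxor]
  · simp only [if_neg h2]
    have : (fun (res a : Int) => PySem.Int.bxor res (PySem.Int.bxor 0 (pvX nums2))) =
        (fun (res : Int) (_ : Int) => PySem.Int.bxor res (pvX nums2)) := by
      funext res a; rw [zero_bxor]
    rw [this, outer_even (pvX nums2) nums1 0, zero_bxor]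

-- ===== VERDICT (by name: the statement is the Claim_ definition above) =====
theorem xorAllNums_spec : Claim_equal_xorAllNums := by
  intro nums1 nums2 _
  show xorAllNums nums1 nums2 = xorAllNums_alt nums1 nums2
  rw [A_closed, B_closed]
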